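-- pv_equiv track=rewrite | github.com/eapata8/Python | LABS/calcule_traingle_sup.py | calculeTriagleSup
-- ===== SOURCE A (Python) =====
-- def calculeTriagleSup(m):
--   ''' (list) -> list
--        retourne la somme des elements du traigle superieur
--        Precondition: m est une liste de listes des entiers
--   '''
--   somme = 0
--   L = 0
--   while L < len(m):
--      C = 0
--      while C < len(m[L]):
--         if L <= C:
--           somme = somme + m[L][C]
--         C = C + 1
--      L = L + 1
--   return somme
-- ===== SOURCE B (Python) =====
-- def calculeTriagleSup(m):
--     return sum(sum(row[i:]) for i, row in enumerate(m))
-- ===== Notes on version B (the rewrite author's own statement) =====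
-- stated objective: simpler
-- what changed: Replaces the two index-counting while loops with a per-element L<=C test by a one-line sum over enumerate that takes the diagonal-onward slice row[i:] of each row and sums it; the per-element comparison disappears.
import Mathlib
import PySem

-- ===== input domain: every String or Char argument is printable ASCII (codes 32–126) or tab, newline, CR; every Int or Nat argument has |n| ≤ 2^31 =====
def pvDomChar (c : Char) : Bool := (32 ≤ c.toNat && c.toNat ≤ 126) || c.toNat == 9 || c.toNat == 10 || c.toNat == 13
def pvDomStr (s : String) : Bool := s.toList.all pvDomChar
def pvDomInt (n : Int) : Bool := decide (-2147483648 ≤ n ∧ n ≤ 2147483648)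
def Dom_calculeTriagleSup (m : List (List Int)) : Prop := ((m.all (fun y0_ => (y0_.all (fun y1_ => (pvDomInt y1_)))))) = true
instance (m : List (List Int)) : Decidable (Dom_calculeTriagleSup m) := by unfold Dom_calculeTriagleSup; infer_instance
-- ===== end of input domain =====

-- B replaces A's index-counting while loops (per-element L<=C test) by summing the diagonal-onward slice row[i:] of each enumerated row: simpler, same cost.


-- ===== PORT A =====
-- while L < len(m): while C < len(m[L]): if L <= C: somme += m[L][C]
-- (index-counting loops rendered as folds over List.range; indices are always in range, getD defaults never fire)
def calculeTriagleSup (m : List (List Int)) : Int :=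
  (List.range m.length).foldl
    (fun somme L =>
      (List.range (m.getD L []).length).foldl
        (fun s C => if L ≤ C then s + (m.getD L []).getD C 0 else s) somme)
    0

-- ===== PORT B =====
-- sum(sum(row[i:]) for i, row in enumerate(m))
def calculeTriagleSup_alt (m : List (List Int)) : Int :=
  ((PySem.List.enumerate m 0).map (fun p => (PySem.List.slice p.2 (some p.1) none).sum)).sum

-- ===== PRECONDITION & SPEC =====
def Spec_calculeTriagleSup (m : List (List Int)) (out : Int) : Prop := out = calculeTriagleSup_alt m
instance (m : List (List Int)) (out : Int) : Decidable (Spec_calculeTriagleSup m out) := by unfold Spec_calculeTriagleSup; infer_instance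

-- ===== CLAIM (what is proved, stated in full; the proofs are below) =====
def Claim_equal_calculeTriagleSup : Prop := ∀ (m : List (List Int)), Dom_calculeTriagleSup m → Spec_calculeTriagleSup m (calculeTriagleSup m)

-- ===== LEMMAS AND PROOFS =====

-- A's inner while loop sums the elements of row from index L on.
theorem pv_inner_eq (row : List Int) (L : Nat) (s : Int) :
    (List.range row.length).foldl
      (fun s C => if L ≤ C then s + row.getD C 0 else s) s
    = s + (row.drop L).sum := by
  induction row generalizing L s with
  | nil => simp
  | cons x xs ih =>
    rw [List.length_cons, List.range_succ_eq_map, List.foldl_cons, List.foldl_map]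
    cases L with
    | zero =>
      simp only [Nat.zero_le, if_true, List.getD_cons_zero, List.getD_cons_succ]
      have h := ih 0 (s + x)
      simp only [Nat.zero_le, if_true, List.drop_zero] at h
      rw [h]
      simp [add_assoc]
    | succ L' =>
      simp only [Nat.succ_le_succ_iff, List.getD_cons_succ, List.drop_succ_cons]
      exact ih L' s

-- A's outer loop, generalized over a row-index offset k, equals B's enumerate-and-slice sum.
theorem pv_outer_eq (m : List (List Int)) (k : Nat) (s : Int) :
    (List.range m.length).foldl
      (fun somme L =>
        (List.range (m.getD L []).length).foldl
          (fun s C => if k + L ≤ C then s + (m.getD L []).getD C 0 else s) somme)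
      s
    = s + ((PySem.List.enumerate m (k : Int)).map
        (fun p => (PySem.List.slice p.2 (some p.1) none).sum)).sum := by
  induction m generalizing k s with
  | nil => simp [PySem.List.enumerate_nil]
  | cons r rs ih =>
    rw [List.length_cons, List.range_succ_eq_map, List.foldl_cons, List.foldl_map]
    simp only [List.getD_cons_zero, List.getD_cons_succ, Nat.add_zero]
    rw [pv_inner_eq r k s]
    have hstep : (fun (somme : Int) (L : Nat) =>
        (List.range (rs.getD L []).length).foldl
          (fun s C => if k + (L + 1) ≤ C then s + (rs.getD L []).getD C 0 else s) somme)
        = (fun (somme : Int) (L : Nat) =>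
        (List.range (rs.getD L []).length).foldl
          (fun s C => if (k + 1) + L ≤ C then s + (rs.getD L []).getD C 0 else s) somme) := by
      funext somme L
      have h' : k + (L + 1) = (k + 1) + L := by omega
      rw [h']
    rw [hstep, ih (k + 1)]
    rw [PySem.List.enumerate_cons]
    simp only [List.map_cons, List.sum_cons, PySem.List.slice_from_natCast]
    push_cast
    ring

-- ===== VERDICT (by name: the statement is the Claim_ definition above) =====
theorem calculeTriagleSup_spec : Claim_equal_calculeTriagleSup := by
  intro m _
  unfold Spec_calculeTriagleSup calculeTriagleSup calculeTriagleSup_alt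
  have h := pv_outer_eq m 0 0
  simp only [Nat.cast_zero, zero_add] at h ⊢
  exact h
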